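-- pv_equiv track=rewrite | github.com/junguk03/programmers | 프로그래머스/2/388352. 비밀 코드 해독/비밀 코드 해독.py | solution
-- ===== SOURCE A (Python) =====
-- def prepare(list1, list2):
--     num1 = 5 - len(set(list1) - set(list2))
--     return num1
--
-- def cnt(num1):
--     list1 = []
--     for i in range(1,num1+1):
--         list1.append(i)
--
--     return list1
--
-- def solution(n, q, ans):
--     import itertools
--     list1 = cnt(n)
--     num1 = len(ans)
--     list2 = itertools.combinations(list1,5)
--     list3 = []
--     for j in range(num1):
--         for i in list2:
--             if prepare(q[j],i) == ans[j]:
--                 list3.append(i)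
--         list2 = list3
--         list3 = []
--     return len(list2)
-- ===== SOURCE B (Python) =====
-- def solution(n, q, ans):
--     m = len(ans)
--     sets = [set(q[j]) for j in range(m)]
--     targets = [a - 5 + len(s) for a, s in zip(ans, sets)]
--
--     def go(elems, slots, counts):
--         if slots == 0:
--             return 1 if counts == targets else 0
--         if len(elems) < slots:
--             return 0
--         x = elems[0]
--         rest = elems[1:]
--         nc = [c + (x in s) for c, s in zip(counts, sets)]
--         take = go(rest, slots - 1, nc) if all(c <= t for c, t in zip(nc, targets)) else 0
--         return take + go(rest, slots, counts)
--
--     return go(list(range(1, n + 1)), 5, [0] * m)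
-- ===== Notes on version B (the rewrite author's own statement) =====
-- stated objective: alternative
-- what changed: A materialises all C(n,5) combinations with itertools and re-filters the list once per query, recomputing two sets and a set difference for every (candidate, query) pair; B never materialises a candidate: it counts recursively by taking/skipping each element of 1..n, carrying one running intersection count per query, pruning a branch as soon as some count exceeds its target, and checking all queries at once at the leaves.
-- outside the precondition, e.g. on solution(4, [[2]], [6, -8964, 10, 8, 4]): A returns 0, B raises IndexError
import Mathlib
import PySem

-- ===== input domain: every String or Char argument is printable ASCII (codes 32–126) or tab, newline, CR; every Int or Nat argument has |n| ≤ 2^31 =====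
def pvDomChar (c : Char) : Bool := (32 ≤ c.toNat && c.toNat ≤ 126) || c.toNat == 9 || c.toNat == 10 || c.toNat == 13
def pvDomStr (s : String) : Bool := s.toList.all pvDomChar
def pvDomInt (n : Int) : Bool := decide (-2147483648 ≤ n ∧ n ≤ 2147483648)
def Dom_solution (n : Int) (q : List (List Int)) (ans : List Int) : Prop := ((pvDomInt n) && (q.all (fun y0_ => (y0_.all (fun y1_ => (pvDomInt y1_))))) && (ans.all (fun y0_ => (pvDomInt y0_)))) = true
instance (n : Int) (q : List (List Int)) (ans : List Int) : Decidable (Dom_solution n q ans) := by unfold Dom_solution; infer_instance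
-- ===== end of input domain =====

-- B replaces A's "materialise all C(n,5) combinations, then filter them once per query" pipeline by a
-- recursive take/skip counter that carries one running intersection count per query (with an upper-bound
-- prune) and never materialises a combination; objective: alternative (return value only; no argument is mutated).

-- ===== PORT A =====
-- prepare(list1, list2) = 5 - len(set(list1) - set(list2))
def prepare (list1 : List Int) (list2 : List Int) : Int :=
  5 - PySem.Set.len (PySem.Set.diff (PySem.Set.ofList list1) (PySem.Set.ofList list2))

-- cnt(num1): append i for i in range(1, num1+1)
def cnt (num1 : Int) : List Int :=
  (PySem.List.pyRange 1 (num1 + 1)).foldl (fun list1 i => list1 ++ [i]) []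

-- itertools.combinations(list1, 5) = PySem.List.combinations list1 5 (tuples as lists).
-- q[j] / ans[j] are ported with pyGetD (exact for the 0 ≤ j < len indices reached under Pre_solution;
-- a shorter q, where Python raises IndexError, is excluded by Pre_solution).
def solution (n : Int) (q : List (List Int)) (ans : List Int) : Int :=
  let list1 := cnt n
  let num1 : Int := PySem.List.len ans
  let init := PySem.List.combinations list1 5
  let final := (PySem.List.pyRange 0 num1).foldl
    (fun list2 j =>
      list2.foldl (fun list3 i =>
        if prepare (PySem.List.pyGetD q j []) i == PySem.List.pyGetD ans j 0 then list3 ++ [i] else list3) [])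
    init
  PySem.List.len final

-- ===== PORT B =====
-- nc = [c + (x in s) for c, s in zip(counts, sets)]
def bump (sets : List (PySem.Set Int)) (counts : List Int) (x : Int) : List Int :=
  List.zipWith (fun c s => c + (if PySem.Set.contains s x then 1 else 0)) counts sets

-- go(elems, slots, counts); the [] case of slots ≥ 1 is Python's len(elems) < slots test (always true there)
def go (sets : List (PySem.Set Int)) (targets : List Int) :
    List Int → Nat → List Int → Int
  | _, 0, counts => if counts = targets then 1 else 0
  | [], _ + 1, _ => 0
  | x :: rest, slots + 1, counts =>
    if rest.length < slots then 0
    else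
      let nc := bump sets counts x
      (if (List.zip nc targets).all (fun p => p.1 ≤ p.2) then go sets targets rest slots nc else 0)
        + go sets targets rest (slots + 1) counts

def solution_alt (n : Int) (q : List (List Int)) (ans : List Int) : Int :=
  let m := ans.length
  let sets := (PySem.List.pyRange 0 (PySem.List.len ans)).map
    (fun j => PySem.Set.ofList (PySem.List.pyGetD q j []))
  let targets := List.zipWith (fun a s => a - 5 + PySem.Set.len s) ans sets
  go sets targets (PySem.List.pyRange 1 (n + 1)) 5 (List.replicate m 0)

-- ===== PRECONDITION & SPEC =====
-- Pre_ excludes inputs where Python A raises — ans = [] (TypeError: len() of an unconsumed itertools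
-- iterator) and len(q) < len(ans) (IndexError on q[j]) — except that with len(q) < len(ans) A still
-- returns 0 when the candidate pool empties before the missing query is reached (q[j] is never
-- evaluated then); B reads all queries up front and raises IndexError there, so those inputs are excluded too.
def Pre_solution (n : Int) (q : List (List Int)) (ans : List Int) : Prop :=
  ans ≠ [] ∧ ans.length ≤ q.length
instance (n : Int) (q : List (List Int)) (ans : List Int) : Decidable (Pre_solution n q ans) := by
  unfold Pre_solution; infer_instance

def pvWitness_solution : Int × List (List Int) × List Int := (6, [[1, 2, 3, 4, 5]], [4])

def Spec_solution (n : Int) (q : List (List Int)) (ans : List Int) (out : Int) : Prop := out = solution_alt n q ans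
instance (n : Int) (q : List (List Int)) (ans : List Int) (out : Int) : Decidable (Spec_solution n q ans out) := by unfold Spec_solution; infer_instance

-- ===== CLAIM (what is proved, stated in full; the proofs are below) =====
def Claim_equal_solution : Prop := ∀ (n : Int) (q : List (List Int)) (ans : List Int), Dom_solution n q ans → Pre_solution n q ans → Spec_solution n q ans (solution n q ans)

-- ===== LEMMAS AND PROOFS =====

-- ===== LEMMAS =====

theorem bump_length (sets : List (PySem.Set Int)) (counts : List Int) (x : Int) :
    (bump sets counts x).length = min counts.length sets.length := by
  simp [bump]

theorem bump_getElem (sets : List (PySem.Set Int)) (counts : List Int) (x : Int)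
    (j : Nat) (hj : j < (bump sets counts x).length) :
    (bump sets counts x)[j] =
      counts[j]'(by simp [bump] at hj; omega) +
        (if PySem.Set.contains (sets[j]'(by simp [bump] at hj; omega)) x then 1 else 0) := by
  simp [bump]

theorem foldl_bump_length (sets : List (PySem.Set Int)) :
    ∀ (c : List Int) (counts : List Int), counts.length = sets.length →
      (c.foldl (bump sets) counts).length = sets.length
  | [], counts, hc => hc
  | x :: c, counts, hc => by
    simp only [List.foldl_cons]
    exact foldl_bump_length sets c _ (by simp [bump_length, hc])

theorem foldl_bump_getElem (sets : List (PySem.Set Int)) :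
    ∀ (c : List Int) (counts : List Int) (hc : counts.length = sets.length)
      (j : Nat) (hj : j < sets.length),
      (c.foldl (bump sets) counts)[j]'(by rw [foldl_bump_length sets c counts hc]; exact hj) =
        counts[j]'(by omega) +
          (c.countP (fun x => PySem.Set.contains (sets[j]'hj) x) : Int)
  | [], counts, hc, j, hj => by
    simp only [List.foldl_nil, List.countP_nil, Nat.cast_zero, add_zero]
  | x :: c, counts, hc, j, hj => by
    simp only [List.foldl_cons]
    rw [foldl_bump_getElem sets c (bump sets counts x) (by simp [bump_length, hc]) j hj]
    rw [bump_getElem sets counts x j (by simp [bump_length, hc]; omega)]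
    simp only [List.countP_cons]
    push_cast
    split <;> ring

theorem zip_all_le_iff : ∀ (a b : List Int) (h : a.length = b.length),
    (((List.zip a b).all (fun p => p.1 ≤ p.2)) = true ↔
      ∀ (j : Nat) (hj : j < a.length), a[j] ≤ b[j]'(by omega))
  | [], [], _ => by simp
  | [], b :: bs, h => by simp at h
  | a :: as, [], h => by simp at h
  | a :: as, b :: bs, h => by
    simp only [List.zip_cons_cons, List.all_cons, Bool.and_eq_true, decide_eq_true_eq]
    rw [zip_all_le_iff as bs (by simpa using h)]
    constructor
    · rintro ⟨h1, h2⟩ j hj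
      cases j with
      | zero => exact h1
      | succ k => exact h2 k (by simpa using hj)
    · intro h
      exact ⟨h 0 (by simp), fun k hk => h (k + 1) (by simpa using hk)⟩

-- if some running count already exceeds its target, no extension reaches the targets
theorem prune_sound (sets : List (PySem.Set Int)) (targets : List Int)
    (nc : List Int) (hc : nc.length = sets.length) (ht : targets.length = sets.length)
    (j : Nat) (hj : j < sets.length)
    (hgt : targets[j]'(by omega) < nc[j]'(by omega)) :
    ∀ c : List Int, ¬ (c.foldl (bump sets) nc = targets) := by
  intro c heq
  have hlen := foldl_bump_length sets c nc hc
  have hv := foldl_bump_getElem sets c nc hc j hj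
  have : (c.foldl (bump sets) nc)[j]'(by omega) = targets[j]'(by omega) :=
    List.getElem_of_eq heq _
  rw [hv] at this
  have hnn : (0 : Int) ≤ (c.countP (fun x => PySem.Set.contains (sets[j]'hj) x) : Int) := by positivity
  omega

theorem go_spec (sets : List (PySem.Set Int)) (targets : List Int)
    (ht : targets.length = sets.length) :
    ∀ (elems : List Int) (slots : Nat) (counts : List Int),
      counts.length = sets.length →
      go sets targets elems slots counts =
        ((PySem.List.combinations elems slots).filter
          (fun c => decide (c.foldl (bump sets) counts = targets))).length
  | [], 0, counts, hc => by
    simp [go, PySem.List.combinations_zero]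
    split <;> simp_all
  | [], slots + 1, counts, hc => by
    simp [go, PySem.List.combinations_nil_succ]
  | x :: rest, 0, counts, hc => by
    simp [go, PySem.List.combinations_zero]
    split <;> simp_all
  | x :: rest, slots + 1, counts, hc => by
    simp only [go]
    by_cases hlen : rest.length < slots
    · rw [if_pos hlen, PySem.List.combinations_eq_nil_of_length_lt]
      · simp
      · simp; omega
    · rw [if_neg hlen, PySem.List.combinations_cons_succ, List.filter_append, List.length_append]
      have hskip := go_spec sets targets ht rest (slots + 1) counts hc
      have hncl : (bump sets counts x).length = sets.length := by simp [bump_length, hc]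
      rw [List.filter_map, List.length_map]
      have hpred : ((fun c => decide (c.foldl (bump sets) counts = targets)) ∘ (fun c => x :: c)) =
          fun c => decide (c.foldl (bump sets) (bump sets counts x) = targets) := by
        funext c; simp [List.foldl_cons]
      rw [hpred]
      by_cases hall : (List.zip (bump sets counts x) targets).all (fun p => p.1 ≤ p.2) = true
      · rw [if_pos hall, go_spec sets targets ht rest slots (bump sets counts x) hncl, hskip]
        push_cast
        ring
      · rw [if_neg hall]
        have : (PySem.List.combinations rest slots).filter
            (fun c => decide (c.foldl (bump sets) (bump sets counts x) = targets)) = [] := by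
          rw [List.filter_eq_nil_iff]
          intro c _
          simp only [decide_eq_true_eq]
          rw [zip_all_le_iff _ _ (by omega)] at hall
          push Not at hall
          obtain ⟨j, hj, hgt⟩ := hall
          exact fun h => prune_sound sets targets (bump sets counts x) hncl ht j (by omega) hgt c h
        rw [this, hskip]
        simp

-- A's inner append-loop is a filter
theorem inner_loop (L : List (List Int)) (p : List Int → Bool) :
    L.foldl (fun l3 i => if p i then l3 ++ [i] else l3) [] = L.filter p := by
  simpa using PySem.List.foldl_append_if p id L []

-- A's outer loop: iterated filtering = one filter by the conjunction
theorem fold_filters {α : Type} (p : Nat → α → Bool) :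
    ∀ (m : Nat) (L : List α),
      (List.range m).foldl (fun L j => L.filter (p j)) L =
        L.filter (fun c => (List.range m).all (fun j => p j c))
  | 0, L => by simp
  | m + 1, L => by
    rw [List.range_succ, List.foldl_append, fold_filters p m L]
    simp only [List.foldl_cons, List.foldl_nil, List.filter_filter, List.all_append,
      List.all_cons, List.all_nil]
    apply List.filter_congr
    intro c _
    simp [Bool.and_comm]

-- two nodup lists: counting a ∩ b from either side
theorem filter_mem_length_swap (a b : List Int) (ha : a.Nodup) (hb : b.Nodup) :
    (a.filter (fun x => decide (x ∈ b))).length = (b.filter (fun x => decide (x ∈ a))).length := by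
  rw [← List.toFinset_card_of_nodup (ha.filter _), ← List.toFinset_card_of_nodup (hb.filter _)]
  rw [List.toFinset_filter, List.toFinset_filter]
  congr 1
  ext x
  simp [And.comm]

-- A's per-query test, for a duplicate-free candidate, is a linear count against the query's distinct elements
theorem pred_equiv (qj : List Int) (aj : Int) (c : List Int) (hcn : c.Nodup) :
    ((prepare qj c == aj) = true) ↔
      ((c.countP (fun x => PySem.Set.contains (PySem.Set.ofList qj) x) : Int)
        = aj - 5 + ((PySem.Set.ofList qj).length : Int)) := by
  have hS : (PySem.Set.ofList qj).Nodup := PySem.Set.nodup_ofList qj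
  have hcont : ∀ (s : PySem.Set Int) (x : Int), PySem.Set.contains s x = decide (x ∈ s) := by
    intro s x; simp [PySem.Set.contains]
  have hmemc : (fun x => !PySem.Set.contains (PySem.Set.ofList c) x) =
      (fun x => !decide (x ∈ c)) := by
    funext x; rw [hcont]; simp [PySem.Set.mem_ofList]
  have hcount : c.countP (fun x => PySem.Set.contains (PySem.Set.ofList qj) x) =
      ((PySem.Set.ofList qj).filter (fun x => decide (x ∈ c))).length := by
    rw [List.countP_eq_length_filter]
    have hfn : (fun x => PySem.Set.contains (PySem.Set.ofList qj) x) =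
        (fun x => decide (x ∈ PySem.Set.ofList qj)) := by funext x; rw [hcont]
    rw [hfn]
    exact filter_mem_length_swap c (PySem.Set.ofList qj) hcn hS
  have hsplit := List.length_eq_length_filter_add (l := PySem.Set.ofList qj)
    (fun x => decide (x ∈ c))
  have hle : ((PySem.Set.ofList qj).filter (fun x => decide (x ∈ c))).length ≤
      (PySem.Set.ofList qj).length := List.length_filter_le _ _
  unfold prepare
  rw [beq_iff_eq]
  unfold PySem.Set.diff PySem.Set.len
  rw [hmemc]
  have hneg : ((PySem.Set.ofList qj).filter (fun x => !decide (x ∈ c))).length =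
      (PySem.Set.ofList qj).length -
        ((PySem.Set.ofList qj).filter (fun x => decide (x ∈ c))).length := by omega
  rw [hneg, hcount]
  constructor <;> intro h <;> [skip; skip] <;> push_cast [Nat.cast_sub hle] at h ⊢ <;> omega

theorem solution_eq (n : Int) (q : List (List Int)) (ans : List Int) :
    solution n q ans =
      (((PySem.List.combinations (PySem.List.pyRange 1 (n + 1)) 5).filter
        (fun c => (List.range ans.length).all
          (fun j => prepare (q.getD j []) c == ans.getD j 0))).length : Int) := by
  unfold solution cnt
  rw [show ((PySem.List.pyRange 1 (n + 1)).foldl (fun l i => l ++ [i]) []) =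
      PySem.List.pyRange 1 (n + 1) from by
    simpa using PySem.List.foldl_append_singleton (PySem.List.pyRange 1 (n + 1)) []]
  simp only [PySem.List.len_eq, PySem.List.pyRange_zero, Int.toNat_natCast, List.foldl_map,
    PySem.List.pyGetD_natCast, inner_loop]
  rw [fold_filters]

theorem solution_alt_eq (n : Int) (q : List (List Int)) (ans : List Int) :
    solution_alt n q ans =
      (((PySem.List.combinations (PySem.List.pyRange 1 (n + 1)) 5).filter
        (fun c => decide (c.foldl
          (bump ((List.range ans.length).map (fun j => PySem.Set.ofList (q.getD j []))))
          (List.replicate ans.length 0) =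
            List.zipWith (fun a s => a - 5 + PySem.Set.len s) ans
              ((List.range ans.length).map (fun j => PySem.Set.ofList (q.getD j [])))))).length : Int) := by
  unfold solution_alt
  simp only [PySem.List.len_eq, PySem.List.pyRange_zero, Int.toNat_natCast, List.map_map,
    Function.comp_def, PySem.List.pyGetD_natCast]
  rw [go_spec]
  · simp [List.length_zipWith]
  · simp

theorem ports_eq (n : Int) (q : List (List Int)) (ans : List Int) :
    solution n q ans = solution_alt n q ans := by
  rw [solution_eq, solution_alt_eq]
  congr 2
  apply List.filter_congr
  intro c hc
  have hcsub : c.Sublist (PySem.List.pyRange 1 (n + 1)) :=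
    ((PySem.List.mem_combinations_iff _ _ _).1 hc).1
  have hcn : c.Nodup := hcsub.nodup (PySem.List.nodup_pyRange_one 1 (n + 1))
  set m := ans.length with hm
  set sets := (List.range m).map (fun j => PySem.Set.ofList (q.getD j [])) with hsets
  set targets := List.zipWith (fun a s => a - 5 + PySem.Set.len s) ans sets with htg
  have hsl : sets.length = m := by simp [hsets]
  have htl : targets.length = m := by simp [htg, List.length_zipWith, hsl]; omega
  have hsj : ∀ (j : Nat) (hj : j < m), sets[j]'(by omega) = PySem.Set.ofList (q.getD j []) := by
    intro j hj; simp [hsets]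
  rw [Bool.eq_iff_iff]
  rw [List.all_eq_true]
  rw [decide_eq_true_eq]
  constructor
  · intro h
    apply List.ext_getElem
    · rw [foldl_bump_length sets c _ (by simp [hsl]), hsl, htl]
    · intro j hj1 hj2
      have hjm : j < m := by
        rwa [foldl_bump_length sets c _ (by simp [hsl]), hsl] at hj1
      rw [foldl_bump_getElem sets c _ (by simp [hsl]) j (by omega)]
      have := (pred_equiv (q.getD j []) (ans.getD j 0) c hcn).1
        (h j (List.mem_range.2 hjm))
      rw [List.getElem_replicate]
      simp only [htg, List.getElem_zipWith, hsj j hjm]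
      rw [List.getD_eq_getElem ans 0 (by omega)] at this
      unfold PySem.Set.len
      omega
  · intro h j hjr
    have hjm : j < m := List.mem_range.1 hjr
    apply (pred_equiv (q.getD j []) (ans.getD j 0) c hcn).2
    have h1 : (c.foldl (bump sets) (List.replicate m 0))[j]'(by
        rw [foldl_bump_length sets c _ (by simp [hsl]), hsl]; omega) =
        targets[j]'(by omega) := List.getElem_of_eq h _
    rw [foldl_bump_getElem sets c _ (by simp [hsl]) j (by omega), List.getElem_replicate] at h1
    simp only [htg, List.getElem_zipWith, hsj j hjm] at h1
    rw [List.getD_eq_getElem ans 0 (by omega)]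
    unfold PySem.Set.len at h1
    omega

-- ===== VERDICT (by name: the statement is the Claim_ definition above) =====
theorem solution_spec : Claim_equal_solution := by
  intro n q ans _ _
  exact ports_eq n q ans
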